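-- pv_equiv track=rewrite | github.com/liamhowatt34/ultimateTexasHoldem | main.py | straight_face_to_int
-- ===== SOURCE A (Python) =====
-- def straight_face_to_int(cards) -> list[int]:
--     ranks = [card[:-1] for card in cards]
--
--     ranks = ['11' if rank == 'J' else rank for rank in ranks]
--     ranks = ['12' if rank == 'Q' else rank for rank in ranks]
--     ranks = ['13' if rank == 'K' else rank for rank in ranks]
--
--     if '2' in ranks and '3' in ranks and '4' in ranks and '5' in ranks:
--         ranks = ['1' if rank == 'A' else rank for rank in ranks]
--     else:
--         ranks = ['14' if rank == 'A' else rank for rank in ranks]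
--
--     int_ranks = [int(rank) for rank in ranks]
--
--     return int_ranks
-- ===== SOURCE B (Python) =====
-- def straight_face_to_int(cards) -> list[int]:
--     face = {'J': 11, 'Q': 12, 'K': 13, 'A': 14}
--     vals = []
--     aces = []
--     wheel = set()
--     for i, card in enumerate(cards):
--         r = card[:-1]
--         if r in ('2', '3', '4', '5'):
--             wheel.add(r)
--         if r == 'A':
--             aces.append(i)
--         vals.append(face[r] if r in face else int(r))
--     if len(wheel) == 4:
--         for i in aces:
--             vals[i] = 1
--     return vals
-- ===== Notes on version B (the rewrite author's own statement) =====
-- stated objective: alternative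
-- what changed: Replaces A's five staged list passes (strip suffix, three substitution comprehensions, wheel membership test on the substituted list, final int() pass) by a single enumerate loop that accumulates the int values with ace provisionally 14, the positions of the aces and the set of wheel ranks seen, then patches the recorded ace positions to 1 when all four wheel ranks were seen.
-- outside the precondition, e.g. on straight_face_to_int(['Xs']): A raises ValueError, B raises ValueError
import Mathlib
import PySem

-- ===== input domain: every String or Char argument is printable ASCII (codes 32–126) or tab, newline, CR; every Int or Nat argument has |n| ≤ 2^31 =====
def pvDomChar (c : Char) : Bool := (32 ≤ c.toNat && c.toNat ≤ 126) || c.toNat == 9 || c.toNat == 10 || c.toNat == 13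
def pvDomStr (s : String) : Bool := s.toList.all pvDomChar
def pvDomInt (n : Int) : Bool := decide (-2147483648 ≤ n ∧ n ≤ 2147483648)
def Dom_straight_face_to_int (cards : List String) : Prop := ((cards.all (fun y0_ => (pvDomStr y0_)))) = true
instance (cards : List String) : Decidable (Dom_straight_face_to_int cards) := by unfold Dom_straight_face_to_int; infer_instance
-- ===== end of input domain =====

-- B replaces A's staged substitution passes over string lists by a single enumerate loop that
-- accumulates int values (ace provisionally 14), ace positions and the wheel-rank set, then
-- patches the recorded ace positions to 1 when the wheel test fires (objective: alternative).

-- ===== PORT A =====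
-- literal port of A; (PySem.Int.ofStr? _).getD 0 : the `none` case (Python ValueError) is excluded by Pre_
def straight_face_to_int (cards : List String) : List Int :=
  let ranks := cards.map (fun card => PySem.Str.slice card none (some (-1)))
  let ranks := ranks.map (fun rank => if rank = "J" then "11" else rank)
  let ranks := ranks.map (fun rank => if rank = "Q" then "12" else rank)
  let ranks := ranks.map (fun rank => if rank = "K" then "13" else rank)
  let ranks :=
    if "2" ∈ ranks ∧ "3" ∈ ranks ∧ "4" ∈ ranks ∧ "5" ∈ ranks then
      ranks.map (fun rank => if rank = "A" then "1" else rank)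
    else
      ranks.map (fun rank => if rank = "A" then "14" else rank)
  ranks.map (fun rank => (PySem.Int.ofStr? rank).getD 0)

-- ===== PORT B =====
-- Source B's local `face = {'J': 11, 'Q': 12, 'K': 13, 'A': 14}` dict
def pvFace : PySem.Dict String Int :=
  (((PySem.Dict.empty.insert "J" 11).insert "Q" 12).insert "K" 13).insert "A" 14
-- Source B's loop body: one enumerate step over the state (vals, aces, wheel);
-- `face[r] if r in face else int(r)` is the match on pvFace.get? (`none` = ValueError, excluded by Pre_)
def pvStep (st : List Int × List Int × PySem.Set String) (p : Int × String) :
    List Int × List Int × PySem.Set String :=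
  let r := PySem.Str.slice p.2 none (some (-1))
  let wheel := if r = "2" ∨ r = "3" ∨ r = "4" ∨ r = "5" then PySem.Set.add st.2.2 r else st.2.2
  let aces := if r = "A" then st.2.1 ++ [p.1] else st.2.1
  let vals := st.1 ++ [match pvFace.get? r with
                       | some v => v
                       | none => (PySem.Int.ofStr? r).getD 0]
  (vals, aces, wheel)
-- port of Source B: single enumerate pass, then `vals[i] = 1` at the recorded ace positions.
-- `i.toNat` is exact here: every recorded index comes from enumerate(cards) starting at 0, so 0 ≤ i.
def straight_face_to_int_alt (cards : List String) : List Int :=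
  let st := (PySem.List.enumerate cards).foldl pvStep ([], [], PySem.Set.empty)
  if PySem.Set.len st.2.2 = 4 then
    st.2.1.foldl (fun vs i => vs.set i.toNat 1) st.1
  else st.1

-- ===== PRECONDITION & SPEC =====
-- Pre_ excludes exactly the inputs where Python A raises ValueError: a card whose rank
-- (everything but the last character) is neither a face 'J'/'Q'/'K'/'A' nor an int() literal.
def Pre_straight_face_to_int (cards : List String) : Prop :=
  ∀ card ∈ cards,
    PySem.Str.slice card none (some (-1)) = "J" ∨
    PySem.Str.slice card none (some (-1)) = "Q" ∨
    PySem.Str.slice card none (some (-1)) = "K" ∨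
    PySem.Str.slice card none (some (-1)) = "A" ∨
    (PySem.Int.ofStr? (PySem.Str.slice card none (some (-1)))).isSome = true
instance (cards : List String) : Decidable (Pre_straight_face_to_int cards) := by
  unfold Pre_straight_face_to_int; infer_instance
def pvWitness_straight_face_to_int : List String := ["As", "10h", "Kd", "2c"]
def Spec_straight_face_to_int (cards : List String) (out : List Int) : Prop := out = straight_face_to_int_alt cards
instance (cards : List String) (out : List Int) : Decidable (Spec_straight_face_to_int cards out) := by unfold Spec_straight_face_to_int; infer_instance

-- ===== CLAIM (what is proved, stated in full; the proofs are below) =====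
def Claim_equal_straight_face_to_int : Prop := ∀ (cards : List String), Dom_straight_face_to_int cards → Pre_straight_face_to_int cards → Spec_straight_face_to_int cards (straight_face_to_int cards)

-- ===== LEMMAS AND PROOFS =====

-- rank of a card: everything but the last character
def pvRk (c : String) : String := PySem.Str.slice c none (some (-1))

-- the final integer value of a rank, given the ace value
def pvValOf (ace : Int) (r : String) : Int :=
  if r = "J" then 11 else if r = "Q" then 12 else if r = "K" then 13
  else if r = "A" then ace else (PySem.Int.ofStr? r).getD 0

-- positions (absolute, starting at s) of the aces among cs
def pvAces (cs : List String) (s : Int) : List Int :=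
  match cs with
  | [] => []
  | c :: cs => (if pvRk c = "A" then [s] else []) ++ pvAces cs (s + 1)

-- the wheel set accumulated by B's loop
def pvWheel (w : PySem.Set String) (cs : List String) : PySem.Set String :=
  match cs with
  | [] => w
  | c :: cs =>
      pvWheel (if pvRk c = "2" ∨ pvRk c = "3" ∨ pvRk c = "4" ∨ pvRk c = "5"
               then PySem.Set.add w (pvRk c) else w) cs

lemma pvAces_cons (c : String) (cs : List String) (s : Int) :
    pvAces (c :: cs) s = (if pvRk c = "A" then [s] else []) ++ pvAces cs (s + 1) := rfl

lemma pvWheel_cons (w : PySem.Set String) (c : String) (cs : List String) :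
    pvWheel w (c :: cs)
      = pvWheel (if pvRk c = "2" ∨ pvRk c = "3" ∨ pvRk c = "4" ∨ pvRk c = "5"
                 then PySem.Set.add w (pvRk c) else w) cs := rfl

-- A's J/Q/K substitution chain, as one function
def pvSubJQK (r : String) : String :=
  if (if (if r = "J" then "11" else r) = "Q" then "12" else if r = "J" then "11" else r) = "K"
  then "13"
  else if (if r = "J" then "11" else r) = "Q" then "12" else if r = "J" then "11" else r

lemma pvSubJQK_eq_digit (r d : String) (hd : d = "2" ∨ d = "3" ∨ d = "4" ∨ d = "5") :
    pvSubJQK r = d ↔ r = d := by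
  unfold pvSubJQK
  rcases hd with h | h | h | h <;> subst h <;> split_ifs <;> simp_all

lemma pvMem_digit (ranks : List String) (d : String) (hd : d = "2" ∨ d = "3" ∨ d = "4" ∨ d = "5") :
    d ∈ ranks.map pvSubJQK ↔ d ∈ ranks := by
  simp only [List.mem_map]
  constructor
  · rintro ⟨r, hr, he⟩; rwa [(pvSubJQK_eq_digit r d hd).mp he] at hr
  · intro hm; exact ⟨d, hm, (pvSubJQK_eq_digit d d hd).mpr rfl⟩

-- A's pipeline, elementwise
lemma pvElemA (r : String) (low : Bool) :
    (PySem.Int.ofStr? (if pvSubJQK r = "A" then (if low then "1" else "14") else pvSubJQK r)).getD 0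
      = pvValOf (if low then 1 else 14) r := by
  by_cases hJ : r = "J"
  · subst hJ; cases low <;> decide
  · by_cases hQ : r = "Q"
    · subst hQ; cases low <;> decide
    · by_cases hK : r = "K"
      · subst hK; cases low <;> decide
      · by_cases hA : r = "A"
        · subst hA; cases low <;> decide
        · have hsub : pvSubJQK r = r := by unfold pvSubJQK; simp [hJ, hQ, hK]
          rw [hsub, if_neg hA]
          simp [pvValOf, hJ, hQ, hK, hA]

-- B's table lookup, elementwise (ace provisionally 14)
lemma pvElemB (r : String) :
    (match pvFace.get? r with
     | some v => v
     | none => (PySem.Int.ofStr? r).getD 0) = pvValOf 14 r := by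
  by_cases hJ : r = "J"
  · subst hJ; decide
  · by_cases hQ : r = "Q"
    · subst hQ; decide
    · by_cases hK : r = "K"
      · subst hK; decide
      · by_cases hA : r = "A"
        · subst hA; decide
        · simp [pvFace, PySem.Dict.get?_insert, PySem.Dict.get?_empty, hJ, hQ, hK, hA, pvValOf]

-- patching an ace to 1 is the same as looking it up with ace value 1
lemma pvValOf_one (r : String) :
    (if r = "A" then (1 : Int) else pvValOf 14 r) = pvValOf 1 r := by
  unfold pvValOf; split_ifs <;> simp_all

lemma pvStep_eq (st : List Int × List Int × PySem.Set String) (i : Int) (c : String) :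
    pvStep st (i, c)
      = (st.1 ++ [pvValOf 14 (pvRk c)],
         if pvRk c = "A" then st.2.1 ++ [i] else st.2.1,
         if pvRk c = "2" ∨ pvRk c = "3" ∨ pvRk c = "4" ∨ pvRk c = "5"
         then PySem.Set.add st.2.2 (pvRk c) else st.2.2) := by
  unfold pvStep pvRk
  simp only [pvElemB]

-- B's loop, characterised
lemma pvLoop_spec (cs : List String) (s : Int) (v a : List Int) (w : PySem.Set String) :
    (PySem.List.enumerate cs s).foldl pvStep (v, a, w)
      = (v ++ cs.map (fun c => pvValOf 14 (pvRk c)), a ++ pvAces cs s, pvWheel w cs) := by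
  induction cs generalizing s v a w with
  | nil => simp [PySem.List.enumerate_nil, pvAces, pvWheel]
  | cons c cs ih =>
      rw [PySem.List.enumerate_cons, List.foldl_cons, pvStep_eq, ih, pvAces_cons, pvWheel_cons]
      refine Prod.ext ?_ (Prod.ext ?_ rfl)
      · simp
      · split_ifs <;> simp

lemma pvMem_wheel (cs : List String) (w : PySem.Set String) (y : String) :
    y ∈ pvWheel w cs ↔ y ∈ w ∨ (y ∈ cs.map pvRk ∧ (y = "2" ∨ y = "3" ∨ y = "4" ∨ y = "5")) := by
  induction cs generalizing w with
  | nil => simp [pvWheel]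
  | cons c cs ih =>
      rw [pvWheel_cons, ih]
      by_cases h : pvRk c = "2" ∨ pvRk c = "3" ∨ pvRk c = "4" ∨ pvRk c = "5"
      · rw [if_pos h]
        simp only [PySem.Set.mem_add, List.map_cons, List.mem_cons]
        constructor
        · rintro ((hw | he) | hm)
          · exact Or.inl hw
          · subst he; exact Or.inr ⟨Or.inl rfl, h⟩
          · exact Or.inr ⟨Or.inr hm.1, hm.2⟩
        · rintro (hw | ⟨(he | hm), hd⟩)
          · exact Or.inl (Or.inl hw)
          · subst he; exact Or.inl (Or.inr rfl)
          · exact Or.inr ⟨hm, hd⟩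
      · rw [if_neg h]
        simp only [List.map_cons, List.mem_cons]
        constructor
        · rintro (hw | ⟨hm, hd⟩)
          · exact Or.inl hw
          · exact Or.inr ⟨Or.inr hm, hd⟩
        · rintro (hw | ⟨(he | hm), hd⟩)
          · exact Or.inl hw
          · subst he; exact absurd hd h
          · exact Or.inr ⟨hm, hd⟩

lemma pvNodup_wheel (cs : List String) (w : PySem.Set String) (hw : w.Nodup) :
    (pvWheel w cs).Nodup := by
  induction cs generalizing w with
  | nil => exact hw
  | cons c cs ih =>
      rw [pvWheel_cons]
      split_ifs with h
      · exact ih _ (PySem.Set.nodup_add w (pvRk c) hw)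
      · exact ih _ hw

-- len(wheel) == 4  ↔  all four wheel ranks occur among the raw ranks
lemma pvLen_wheel (cs : List String) :
    PySem.Set.len (pvWheel PySem.Set.empty cs) = 4 ↔
      ("2" ∈ cs.map pvRk ∧ "3" ∈ cs.map pvRk ∧ "4" ∈ cs.map pvRk ∧ "5" ∈ cs.map pvRk) := by
  set w := pvWheel PySem.Set.empty cs with hw
  have hmem : ∀ y, y ∈ w ↔ (y ∈ cs.map pvRk ∧ (y = "2" ∨ y = "3" ∨ y = "4" ∨ y = "5")) := by
    intro y
    rw [hw, pvMem_wheel]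
    simp [PySem.Set.empty]
  have hnd : w.Nodup := pvNodup_wheel cs PySem.Set.empty (by simp [PySem.Set.empty])
  have hsub : w ⊆ ["2", "3", "4", "5"] := by
    intro y hy
    rcases ((hmem y).mp hy).2 with h | h | h | h <;> simp [h]
  have hsp : w.Subperm ["2", "3", "4", "5"] := hnd.subperm hsub
  have hlen : PySem.Set.len w = (w.length : Int) := by simp [PySem.Set.len]
  constructor
  · intro h4
    have hl : ["2", "3", "4", "5"].length ≤ w.length := by
      rw [hlen] at h4
      have : w.length = 4 := by exact_mod_cast h4
      simp [this]
    have hperm := List.Subperm.perm_of_length_le hsp hl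
    refine ⟨?_, ?_, ?_, ?_⟩ <;>
      exact ((hmem _).mp (hperm.mem_iff.mpr (by decide))).1
  · rintro ⟨h2, h3, h4, h5⟩
    have hsup : (["2", "3", "4", "5"] : List String) ⊆ w := by
      intro y hy
      fin_cases hy
      · exact (hmem "2").mpr ⟨h2, by decide⟩
      · exact (hmem "3").mpr ⟨h3, by decide⟩
      · exact (hmem "4").mpr ⟨h4, by decide⟩
      · exact (hmem "5").mpr ⟨h5, by decide⟩
    have hsp' : (["2", "3", "4", "5"] : List String).Subperm w := (by decide : (["2", "3", "4", "5"] : List String).Nodup).subperm hsup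
    have h1 := hsp.length_le
    have h2' := hsp'.length_le
    rw [hlen]
    simp at h1 h2'
    omega

-- `vals[i] = 1` at the ace positions = mapping with ace value 1
lemma pvFix (cs : List String) (pre : List Int) :
    (pvAces cs (pre.length : Int)).foldl (fun vs i => vs.set i.toNat 1)
        (pre ++ cs.map (fun c => pvValOf 14 (pvRk c)))
      = pre ++ cs.map (fun c => if pvRk c = "A" then 1 else pvValOf 14 (pvRk c)) := by
  induction cs generalizing pre with
  | nil => simp [pvAces]
  | cons c cs ih =>
      rw [pvAces_cons]
      by_cases hA : pvRk c = "A"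
      · rw [if_pos hA]
        simp only [List.map_cons, List.singleton_append, List.foldl_cons, if_pos hA]
        have hset : (pre ++ pvValOf 14 (pvRk c) :: cs.map (fun c => pvValOf 14 (pvRk c))).set
            ((pre.length : Int)).toNat 1
            = (pre ++ [1]) ++ cs.map (fun c => pvValOf 14 (pvRk c)) := by
          rw [Int.toNat_natCast, List.set_append]
          simp
        rw [hset]
        have hlen : ((pre.length : Int) + 1) = (((pre ++ [(1 : Int)]).length : Nat) : Int) := by
          simp
        rw [hlen, ih (pre ++ [1])]
        simp
      · rw [if_neg hA]
        simp only [List.map_cons, List.nil_append, if_neg hA]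
        have hre : pre ++ pvValOf 14 (pvRk c) :: cs.map (fun c => pvValOf 14 (pvRk c))
            = (pre ++ [pvValOf 14 (pvRk c)]) ++ cs.map (fun c => pvValOf 14 (pvRk c)) := by
          simp
        have hlen : ((pre.length : Int) + 1)
            = (((pre ++ [pvValOf 14 (pvRk c)]).length : Nat) : Int) := by
          simp
        rw [hre, hlen, ih (pre ++ [pvValOf 14 (pvRk c)])]
        simp

-- B, characterised in closed form
lemma pvAlt_eq (cards : List String) :
    straight_face_to_int_alt cards
      = (if PySem.Set.len (pvWheel PySem.Set.empty cards) = 4 then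
           (pvAces cards 0).foldl (fun vs i => vs.set i.toNat 1)
             (cards.map (fun c => pvValOf 14 (pvRk c)))
         else cards.map (fun c => pvValOf 14 (pvRk c))) := by
  unfold straight_face_to_int_alt
  rw [pvLoop_spec]
  rfl

-- A's composed pipeline, elementwise, with the ace low / high
lemma pvElemA_low (c : String) :
    (PySem.Int.ofStr? (if pvSubJQK (PySem.Str.slice c none (some (-1))) = "A" then "1"
        else pvSubJQK (PySem.Str.slice c none (some (-1))))).getD 0
      = (if pvRk c = "A" then (1 : Int) else pvValOf 14 (pvRk c)) := by
  rw [pvValOf_one]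
  exact pvElemA (pvRk c) true

lemma pvElemA_high (c : String) :
    (PySem.Int.ofStr? (if pvSubJQK (PySem.Str.slice c none (some (-1))) = "A" then "14"
        else pvSubJQK (PySem.Str.slice c none (some (-1))))).getD 0
      = pvValOf 14 (pvRk c) :=
  pvElemA (PySem.Str.slice c none (some (-1))) false

-- ===== VERDICT (by name: the statement is the Claim_ definition above) =====
set_option maxHeartbeats 1600000 in
theorem straight_face_to_int_spec : Claim_equal_straight_face_to_int := by
  intro cards _ _
  unfold Spec_straight_face_to_int straight_face_to_int
  rw [pvAlt_eq]
  set ranks := cards.map (fun card => PySem.Str.slice card none (some (-1))) with hranks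
  have hchain :
      ((ranks.map (fun rank => if rank = "J" then "11" else rank)).map
        (fun rank => if rank = "Q" then "12" else rank)).map
        (fun rank => if rank = "K" then "13" else rank) = ranks.map pvSubJQK := by
    simp only [List.map_map]; rfl
  simp only [hchain]
  have hrk : ranks = cards.map pvRk := rfl
  have hfix := pvFix cards []
  simp only [List.nil_append, List.length_nil, Nat.cast_zero] at hfix
  have hcond := pvLen_wheel cards
  have hA : ("2" ∈ ranks.map pvSubJQK ∧ "3" ∈ ranks.map pvSubJQK ∧
      "4" ∈ ranks.map pvSubJQK ∧ "5" ∈ ranks.map pvSubJQK) ↔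
      ("2" ∈ cards.map pvRk ∧ "3" ∈ cards.map pvRk ∧ "4" ∈ cards.map pvRk ∧ "5" ∈ cards.map pvRk) := by
    rw [pvMem_digit ranks "2" (by simp), pvMem_digit ranks "3" (by simp),
        pvMem_digit ranks "4" (by simp), pvMem_digit ranks "5" (by simp), hrk]
  by_cases hc : "2" ∈ cards.map pvRk ∧ "3" ∈ cards.map pvRk ∧ "4" ∈ cards.map pvRk ∧ "5" ∈ cards.map pvRk
  · rw [if_pos (hA.mpr hc), if_pos (hcond.mpr hc), hfix]
    simp only [hranks, List.map_map, Function.comp_def]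
    exact List.map_congr_left fun c _ => pvElemA_low c
  · rw [if_neg (fun h => hc (hA.mp h)), if_neg (fun h => hc (hcond.mp h))]
    simp only [hranks, List.map_map, Function.comp_def]
    exact List.map_congr_left fun c _ => pvElemA_high c
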